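-- pv_equiv track=rewrite | github.com/eunchaeee/coding-test | 프로그래머스/0/181900. 글자 지우기/글자 지우기.py | solution
-- ===== SOURCE A (Python) =====
-- def solution(my_string, indices):
--     answer = ''
--     full_idx = list(range(len(my_string)))
--     answer_idx = list(set(full_idx) - set(indices))
--     answer_idx.sort()
--     for i in answer_idx:
--         answer+= my_string[i]
--     return answer
-- ===== SOURCE B (Python) =====
-- def solution(my_string, indices):
--     excluded = set(indices)
--     return ''.join(ch for i, ch in enumerate(my_string) if i not in excluded)
-- ===== Notes on version B (the rewrite author's own statement) =====
-- stated objective: simpler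
-- what changed: Replaces the full-index list, set-difference complement and sort with a single enumerate pass over the string that keeps characters whose position is not in set(indices), joined at the end.
import Mathlib
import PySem

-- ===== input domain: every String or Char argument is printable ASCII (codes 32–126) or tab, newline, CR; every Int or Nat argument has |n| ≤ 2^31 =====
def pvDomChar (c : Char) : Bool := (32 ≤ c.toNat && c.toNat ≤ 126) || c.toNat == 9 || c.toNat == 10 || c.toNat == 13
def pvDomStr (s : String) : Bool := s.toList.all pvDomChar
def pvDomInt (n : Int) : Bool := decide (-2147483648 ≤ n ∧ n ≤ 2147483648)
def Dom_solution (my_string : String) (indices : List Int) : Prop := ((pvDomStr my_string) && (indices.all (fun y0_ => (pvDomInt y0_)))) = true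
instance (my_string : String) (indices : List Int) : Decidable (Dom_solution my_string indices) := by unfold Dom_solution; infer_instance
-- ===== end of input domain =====

-- B replaces A's index-list set-difference and sort by one enumerate pass over the string (objective: simpler).

-- ===== PORT A =====
def solution (my_string : String) (indices : List Int) : String :=
  let answer : List Char := []   -- answer = ''  (built as a char list, joined at the end)
  let full_idx : List Int := PySem.List.pyRange 0 (PySem.Str.len my_string) 1
  let answer_idx : PySem.Set Int := PySem.Set.diff (PySem.Set.ofList full_idx) (PySem.Set.ofList indices)
  let answer_idx_sorted := PySem.List.sorted answer_idx (fun x => x) false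
  -- for i in answer_idx: answer += my_string[i]  (index is always in range; none is unreachable)
  String.mk (answer_idx_sorted.foldl (fun acc i => acc ++ (PySem.Str.pyGet? my_string i).toList) answer)

-- ===== PORT B =====
def solution_alt (my_string : String) (indices : List Int) : String :=
  let excluded : PySem.Set Int := PySem.Set.ofList indices
  String.mk ((((PySem.List.enumerate my_string.toList 0).filter
      (fun p => !(PySem.Set.contains excluded p.1))).map (fun p => p.2)))

-- ===== PRECONDITION & SPEC =====
def Spec_solution (my_string : String) (indices : List Int) (out : String) : Prop := out = solution_alt my_string indices
instance (my_string : String) (indices : List Int) (out : String) : Decidable (Spec_solution my_string indices out) := by unfold Spec_solution; infer_instance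

-- ===== CLAIM (what is proved, stated in full; the proofs are below) =====
def Claim_equal_solution : Prop := ∀ (my_string : String) (indices : List Int), Dom_solution my_string indices → Spec_solution my_string indices (solution my_string indices)

-- ===== LEMMAS AND PROOFS =====

-- set(xs) of a duplicate-free list is the list itself
theorem ofList_of_nodup_aux (xs acc : List Int) (h : (acc ++ xs).Nodup) :
    xs.foldl PySem.Set.add acc = acc ++ xs := by
  induction xs generalizing acc with
  | nil => simp
  | cons x xs ih =>
    have hx : x ∉ acc := by
      intro hmem
      exact (List.disjoint_of_nodup_append h) hmem (by simp)
    have : PySem.Set.add acc x = acc ++ [x] := PySem.Set.add_of_not_mem hx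
    simp only [List.foldl_cons, this]
    rw [ih (acc ++ [x]) (by simpa using h)]
    simp

theorem ofList_of_nodup (xs : List Int) (h : xs.Nodup) : PySem.Set.ofList xs = xs := by
  have := ofList_of_nodup_aux xs [] (by simpa using h)
  simpa [PySem.Set.ofList_eq_foldl] using this

theorem solution_spec' (my_string : String) (indices : List Int) :
    solution my_string indices = solution_alt my_string indices := by
  unfold solution solution_alt
  simp only []
  set xs := my_string.toList with hxs
  set ex := PySem.Set.ofList indices with hex
  have hrange : PySem.Set.ofList (PySem.List.pyRange 0 (PySem.Str.len my_string) 1)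
      = PySem.List.pyRange 0 (PySem.Str.len my_string) 1 :=
    ofList_of_nodup _ (PySem.List.nodup_pyRange_one _ _)
  have hdiff : PySem.Set.diff (PySem.Set.ofList (PySem.List.pyRange 0 (PySem.Str.len my_string) 1)) ex
      = (PySem.List.pyRange 0 (PySem.Str.len my_string) 1).filter (fun x => !ex.contains x) := by
    rw [hrange]; rfl
  rw [hdiff]
  -- the filtered range is already strictly increasing, so sorting it is the identity
  have hsorted : PySem.List.sorted
      ((PySem.List.pyRange 0 (PySem.Str.len my_string) 1).filter (fun x => !ex.contains x))
      (fun x => x) false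
      = (PySem.List.pyRange 0 (PySem.Str.len my_string) 1).filter (fun x => !ex.contains x) := by
    apply PySem.List.sorted_eq_self_of_pairwise
    have := (PySem.List.pairwise_lt_pyRange_one 0 (PySem.Str.len my_string)).filter
      (fun x => !ex.contains x)
    exact this.imp (fun h => le_of_lt h)
  rw [hsorted]
  -- A's loop: every index in the filtered range is in range, so my_string[i] is a single char
  have hlen : PySem.Str.len my_string = (xs.length : Int) := by
    simp [PySem.Str.len_eq, hxs]
  have hbody : ∀ (acc : List Char), ∀ i ∈ (PySem.List.pyRange 0 (PySem.Str.len my_string) 1).filter (fun x => !ex.contains x),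
      acc ++ (PySem.Str.pyGet? my_string i).toList
        = acc ++ [PySem.List.pyGetD xs i ' '] := by
    intro acc i hi
    have hi' : i ∈ PySem.List.pyRange 0 (PySem.Str.len my_string) 1 := (List.mem_filter.mp hi).1
    have hmem := (PySem.List.mem_pyRange_one).mp hi'
    have h0 : (0 : Int) ≤ i := hmem.1
    have h1 : i < (xs.length : Int) := by rw [← hlen]; exact hmem.2
    have hg : PySem.Str.pyGet? my_string i = some (xs[i.toNat]'(by omega)) := by
      have : PySem.Str.pyGet? my_string i = PySem.List.pyGet? xs i := by
        simp [PySem.Str.pyGet?, hxs]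
      rw [this, PySem.List.pyGet?_eq_some_getElem xs h0 h1]
    rw [hg, PySem.List.pyGetD_eq_getElem xs ' ' h0 h1]
    rfl
  rw [PySem.List.foldl_congr_mem _ _ _ _ hbody,
      PySem.List.foldl_append_singleton_eq_map]
  -- B's side: enumerate as a map over the range, then push filter/map through
  rw [show PySem.List.enumerate xs = PySem.List.enumerate xs 0 from rfl]
  rw [PySem.List.enumerate_eq_map_pyRange xs ' ']
  rw [List.filter_map, List.map_map]
  have hlen' : PySem.List.len xs = PySem.Str.len my_string := by
    simp [PySem.Str.len_eq, PySem.List.len, hxs]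
  rw [hlen']
  rfl

-- ===== VERDICT (by name: the statement is the Claim_ definition above) =====
theorem solution_spec : Claim_equal_solution := by
  intro my_string indices _
  exact solution_spec' my_string indices
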